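-- pv_equiv track=rewrite | github.com/lirmag/All-works | test_4.py | counting_time_1stream
-- ===== SOURCE A (Python) =====
-- def counting_time_1stream(mnt): #Высчитать статус урока для первого потока
--     maximum = 886
--     func = 'working'
--     lessons_end = {510: 550,
--                    525: 565,
--                    585: 625,
--                    635: 675,
--                    685: 725,
--                    745: 785,
--                    795: 835,
--                    845: 885}
--     for elem in lessons_end:
--         if elem < mnt and lessons_end[elem] > mnt:
--             func = 'done'
--             return str('The lesson is already in progress!👍')
--     if func == 'working':
--         for elem in lessons_end:
--             if mnt - lessons_end[elem] > 0:
--                 for el in lessons_end: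
--                     if mnt > maximum:
--                         return str('Lessons are already over!🎉')
--                     if mnt < el:
--                         if el - mnt == 1:
--                             min = ' minute'
--                         else:
--                             min = ' minutes'
--                         ans = str(el - mnt) + min + ' to go before the lesson starts!🕰'
--                         return ans
-- ===== SOURCE B (Python) =====
-- INTERVALS = [(510, 550), (525, 565), (585, 625), (635, 675),
--              (685, 725), (745, 785), (795, 835), (845, 885)]
--
-- def counting_time_1stream(mnt):
--     if mnt > 886:
--         return 'Lessons are already over!🎉'
--     if any(s < mnt < e for s, e in INTERVALS):
--         return 'The lesson is already in progress!👍'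
--     if mnt > 550:
--         nxt = next((s for s, _ in INTERVALS if mnt < s), None)
--         if nxt is not None:
--             n = nxt - mnt
--             return str(n) + (' minute' if n == 1 else ' minutes') + ' to go before the lesson starts!🕰'
--     return None
-- ===== Notes on version B (the rewrite author's own statement) =====
-- stated objective: simpler
-- what changed: Replaced A's triple-nested dict loops (with a re-scan of the whole dict inside the second loop) by a flat cascade: one 'over' test, one any() scan over the interval list, then a single next() lookup of the first start greater than mnt; Pre_ excludes the inputs (mnt <= 510 and mnt in {845, 885, 886}) where A falls through and returns None, which is not a str.
-- outside the precondition, e.g. on counting_time_1stream(0): A returns None, B returns None; on counting_time_1stream(510): A returns None, B returns None; on counting_time_1stream(845): A returns None, B returns None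
import Mathlib
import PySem

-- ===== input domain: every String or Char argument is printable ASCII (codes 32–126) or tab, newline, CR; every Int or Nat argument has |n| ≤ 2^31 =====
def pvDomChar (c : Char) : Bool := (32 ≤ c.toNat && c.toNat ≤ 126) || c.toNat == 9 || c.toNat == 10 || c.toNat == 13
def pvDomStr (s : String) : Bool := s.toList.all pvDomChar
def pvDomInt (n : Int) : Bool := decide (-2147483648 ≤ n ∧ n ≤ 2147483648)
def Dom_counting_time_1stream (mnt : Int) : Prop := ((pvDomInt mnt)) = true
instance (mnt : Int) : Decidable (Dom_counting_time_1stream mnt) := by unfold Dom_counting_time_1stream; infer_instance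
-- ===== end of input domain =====

-- B flattens A's redundant nested dict loops into a flat cascade (over?/in-progress?/next-start countdown); objective: simpler.
-- On the inputs excluded by Pre_ the Python A returns None (not a str); both Pythons return None there, the ports return "".

-- ===== PORT A =====
-- A's dict of lesson start → end, in insertion order.
def pvLessons : List (Int × Int) :=
  [(510, 550), (525, 565), (585, 625), (635, 675),
   (685, 725), (745, 785), (795, 835), (845, 885)]

-- first for-loop: any start < mnt < end → in progress
def pvA_loop1 : List (Int × Int) → Int → Option String
  | [], _ => none
  | (elem, e) :: rest, mnt =>
    if elem < mnt ∧ e > mnt then some "The lesson is already in progress!👍"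
    else pvA_loop1 rest mnt

-- inner for-loop over the dict keys
def pvA_inner : List (Int × Int) → Int → Option String
  | [], _ => none
  | (el, _) :: rest, mnt =>
    if mnt > 886 then some "Lessons are already over!🎉"
    else if mnt < el then
      some (PySem.Int.toStr (el - mnt) ++
            (if el - mnt = 1 then " minute" else " minutes") ++
            " to go before the lesson starts!🕰")
    else pvA_inner rest mnt

-- outer second for-loop: whenever mnt - end > 0, run the inner loop over the whole dict
def pvA_loop2 : List (Int × Int) → Int → Option String
  | [], _ => none
  | (_, e) :: rest, mnt =>
    if mnt - e > 0 then
      match pvA_inner pvLessons mnt with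
      | some s => some s
      | none => pvA_loop2 rest mnt
    else pvA_loop2 rest mnt

def counting_time_1stream (mnt : Int) : String :=
  match pvA_loop1 pvLessons mnt with
  | some s => s
  | none => (pvA_loop2 pvLessons mnt).getD ""   -- Python falls through to None here; excluded by Pre_

-- ===== PORT B =====
-- next((s for s, _ in INTERVALS if mnt < s), None): first start strictly greater than mnt
def pvB_next : List (Int × Int) → Int → Option Int
  | [], _ => none
  | (s, _) :: rest, mnt => if mnt < s then some s else pvB_next rest mnt

def counting_time_1stream_alt (mnt : Int) : String :=
  if mnt > 886 then "Lessons are already over!🎉"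
  else if pvLessons.any (fun p => decide (p.1 < mnt) && decide (mnt < p.2)) then
    "The lesson is already in progress!👍"
  else if mnt > 550 then
    match pvB_next pvLessons mnt with
    | some s =>
        let n := s - mnt
        PySem.Int.toStr n ++ (if n = 1 then " minute" else " minutes") ++
          " to go before the lesson starts!🕰"
    | none => ""   -- Python B returns None here; excluded by Pre_
  else ""          -- Python B returns None here; excluded by Pre_

-- ===== PRECONDITION & SPEC =====
-- Pre_ excludes exactly the inputs on which A falls through and returns None (not a str):
-- mnt ≤ 510 and the gap points 845, 885, 886 where no lesson is in progress and no later start exists.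
def Pre_counting_time_1stream (mnt : Int) : Prop :=
  510 < mnt ∧ mnt ≠ 845 ∧ mnt ≠ 885 ∧ mnt ≠ 886
instance (mnt : Int) : Decidable (Pre_counting_time_1stream mnt) := by
  unfold Pre_counting_time_1stream; infer_instance
def pvWitness_counting_time_1stream : Int := (600)
def Spec_counting_time_1stream (mnt : Int) (out : String) : Prop := out = counting_time_1stream_alt mnt
instance (mnt : Int) (out : String) : Decidable (Spec_counting_time_1stream mnt out) := by unfold Spec_counting_time_1stream; infer_instance

-- ===== CLAIM (what is proved, stated in full; the proofs are below) =====
def Claim_equal_counting_time_1stream : Prop := ∀ (mnt : Int), Dom_counting_time_1stream mnt → Pre_counting_time_1stream mnt → Spec_counting_time_1stream mnt (counting_time_1stream mnt)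

-- ===== LEMMAS AND PROOFS =====

-- A's first loop returns the in-progress string iff some interval has start < mnt < end.
theorem pvA_loop1_char (L : List (Int × Int)) (mnt : Int) :
    pvA_loop1 L mnt =
      (if L.any (fun p => decide (p.1 < mnt) && decide (mnt < p.2)) then
        some "The lesson is already in progress!👍" else none) := by
  induction L with
  | nil => rfl
  | cons hd tl ih =>
    obtain ⟨s, e⟩ := hd
    simp only [pvA_loop1, List.any_cons, ih]
    rcases Decidable.em (s < mnt ∧ mnt < e) with hc | hc
    · rw [if_pos hc]
      simp [hc.1, hc.2]
    · rw [if_neg hc]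
      have hb : (decide (s < mnt) && decide (mnt < e)) = false := by
        simp only [Bool.and_eq_false_iff, decide_eq_false_iff_not]
        tauto
      simp only [hb, Bool.false_or]

-- For mnt ≤ 886, A's inner loop returns the countdown for the first start greater than mnt.
theorem pvA_inner_char (L : List (Int × Int)) (mnt : Int) (h : ¬ mnt > 886) :
    pvA_inner L mnt =
      (pvB_next L mnt).map (fun s =>
        PySem.Int.toStr (s - mnt) ++
          (if s - mnt = 1 then " minute" else " minutes") ++
          " to go before the lesson starts!🕰") := by
  induction L with
  | nil => rfl
  | cons hd tl ih =>
    obtain ⟨s, e⟩ := hd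
    simp only [pvA_inner, pvB_next, if_neg h, ih]
    split_ifs <;> simp_all

-- A's outer second loop reaches its inner loop iff some lesson end lies strictly below mnt.
theorem pvA_loop2_char (L : List (Int × Int)) (mnt : Int) :
    pvA_loop2 L mnt =
      (if L.any (fun p => decide (mnt - p.2 > 0)) then pvA_inner pvLessons mnt else none) := by
  induction L with
  | nil => rfl
  | cons hd tl ih =>
    obtain ⟨s, e⟩ := hd
    simp only [pvA_loop2, List.any_cons, ih]
    rcases Decidable.em (mnt - e > 0) with hc | hc
    · have hb : decide (mnt - e > 0) = true := by simpa using hc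
      rw [if_pos hc]
      cases pvA_inner pvLessons mnt <;>
        simp only [hb, Bool.true_or] <;> split_ifs <;> rfl
    · have hb : decide (mnt - e > 0) = false := by simpa using hc
      rw [if_neg hc]
      simp only [hb, Bool.false_or]

-- ===== VERDICT (by name: the statement is the Claim_ definition above) =====
theorem counting_time_1stream_spec : Claim_equal_counting_time_1stream := by
  intro mnt _ hpre
  obtain ⟨h1, h2, h3, h4⟩ := hpre
  unfold Spec_counting_time_1stream counting_time_1stream counting_time_1stream_alt
  rw [pvA_loop1_char, pvA_loop2_char]
  by_cases h886 : mnt > 886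
  · simp [pvA_inner, pvLessons, h886]
    rw [if_neg (by omega), if_pos (by omega)]
    rfl
  · rw [pvA_inner_char pvLessons mnt h886]
    simp only [pvLessons, List.any_cons, List.any_nil, Bool.or_eq_true, Bool.and_eq_true,
      decide_eq_true_eq, Bool.false_eq_true, or_false, if_neg h886]
    split_ifs <;>
      first
        | rfl
        | (cases pvB_next [((510:Int), (550:Int)), (525, 565), (585, 625), (635, 675),
             (685, 725), (745, 785), (795, 835), (845, 885)] mnt <;> rfl)
        | (exfalso; omega)
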